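-- pv_equiv track=rewrite | github.com/pypi-data/pypi-mirror-314 | packages/Auto-DLP/auto_dlp-2024.12.24-py3-none-any.whl/auto_dlp/YoutubeDataAPIv3.py | deduplicate_playlist_items
-- ===== SOURCE A (Python) =====
-- from collections import Counter
--
-- def deduplicate_playlist_items(config, playlist_items):
--     name_counter = Counter()
--
--     for item in playlist_items:
--         name_counter[item["name"]] += 1
--
--     index_names = set()
--
--     for name, count in name_counter.items():
--         if count > 1:
--             index_names.add(name)
--
--     if len(index_names) == 0:
--         return playlist_items
--
--     name_counter = Counter()
--
--     for item in playlist_items: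
--         name = item["name"]
--         if item["name"] in index_names:
--             name_counter[name] += 1
--             item["name"] = f"{name} ={name_counter[name]}="
--
--     return playlist_items
-- ===== SOURCE B (Python) =====
-- def deduplicate_playlist_items(config, playlist_items):
--     groups = {}
--     for i, item in enumerate(playlist_items):
--         groups.setdefault(item["name"], []).append(i)
--     for name, idxs in groups.items():
--         if len(idxs) > 1:
--             for k, i in enumerate(idxs, 1):
--                 playlist_items[i]["name"] = f"{name} ={k}="
--     return playlist_items
-- ===== Notes on version B (the rewrite author's own statement) =====
-- stated objective: alternative
-- what changed: A counts names with a Counter, builds the set of duplicated names, then runs a second counting pass relabeling items on the fly; B builds one grouping dict name -> list of positions in a single pass and relabels each bucket of size > 1 by enumerating it, so the duplicate test and the per-item running counter disappear.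
import Mathlib
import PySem

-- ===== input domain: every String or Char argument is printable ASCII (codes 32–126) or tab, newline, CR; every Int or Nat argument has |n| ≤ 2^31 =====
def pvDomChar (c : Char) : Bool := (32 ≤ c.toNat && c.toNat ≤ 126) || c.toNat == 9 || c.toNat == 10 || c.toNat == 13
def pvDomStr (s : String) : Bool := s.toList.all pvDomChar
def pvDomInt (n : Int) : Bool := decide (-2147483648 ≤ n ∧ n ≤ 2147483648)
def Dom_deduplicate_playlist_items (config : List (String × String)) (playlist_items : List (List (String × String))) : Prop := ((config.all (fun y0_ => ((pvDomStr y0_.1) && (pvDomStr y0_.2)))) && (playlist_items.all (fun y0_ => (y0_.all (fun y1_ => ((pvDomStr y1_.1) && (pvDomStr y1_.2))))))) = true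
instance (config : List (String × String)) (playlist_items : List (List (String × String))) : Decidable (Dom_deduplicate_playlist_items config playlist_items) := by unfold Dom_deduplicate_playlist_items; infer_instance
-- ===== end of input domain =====

-- B replaces A's two sequential Counter passes by one grouping dict (name -> positions) and a
-- bucket-wise relabel; the equivalence proved here is about the RETURN value (both Pythons also
-- mutate the item dicts in place and return the very list object they were given).

-- item["name"] (both Pythons): first-match lookup in the item's association list; total form, the
-- "" default is only read outside Pre_deduplicate_playlist_items
def pvName (item : List (String × String)) : String :=
  ((PySem.Dict.mk item).get? "name").getD ""

-- f"{name} ={k}="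
def pvRename (name : String) (k : Int) : String :=
  name ++ " =" ++ PySem.Int.toStr k ++ "="

-- item["name"] = v  (dict assignment: overwrite in place)
def pvSetName (item : List (String × String)) (v : String) : List (String × String) :=
  ((PySem.Dict.mk item).insert "name" v).items

-- ===== PORT A =====
def deduplicate_playlist_items (config : List (String × String)) (playlist_items : List (List (String × String))) : List (List (String × String)) :=
  let name_counter : PySem.Dict String Int :=
    playlist_items.foldl (fun d item => d.modify (pvName item) 0 (· + 1)) PySem.Dict.empty
  let index_names : PySem.Set String :=
    name_counter.items.foldl (fun s p => if p.2 > 1 then PySem.Set.add s p.1 else s) PySem.Set.empty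
  if index_names.length = 0 then playlist_items
  else
    (playlist_items.foldl
      (fun (st : PySem.Dict String Int × List (List (String × String))) item =>
        let name := pvName item
        if PySem.Set.contains index_names name then
          let c := st.1.modify name 0 (· + 1)
          (c, st.2 ++ [pvSetName item (pvRename name (c.getD name 0))])
        else (st.1, st.2 ++ [item]))
      (PySem.Dict.empty, [])).2

-- ===== PORT B =====
def deduplicate_playlist_items_alt (config : List (String × String)) (playlist_items : List (List (String × String))) : List (List (String × String)) :=
  let groups : PySem.Dict String (List Int) :=
    (PySem.List.enumerate playlist_items).foldl
      (fun d p => d.modify (pvName p.2) [] (· ++ [p.1])) PySem.Dict.empty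
  groups.items.foldl
    (fun lst q =>
      if q.2.length > 1 then
        (PySem.List.enumerate q.2 1).foldl
          (fun lst r =>
            PySem.List.pySetD lst r.2 (pvSetName (PySem.List.pyGetD lst r.2 []) (pvRename q.1 r.1)))
          lst
      else lst)
    playlist_items

-- ===== PRECONDITION & SPEC =====
-- Pre_ excludes (a) items without a "name" key, on which the Python A (and B) raises KeyError, and
-- (b) items whose association list repeats a key, which no Python dict value can represent.
def Pre_deduplicate_playlist_items (config : List (String × String)) (playlist_items : List (List (String × String))) : Prop :=
  ∀ item ∈ playlist_items, (PySem.Dict.mk item).contains "name" = true ∧ (item.map Prod.fst).Nodup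
instance (config : List (String × String)) (playlist_items : List (List (String × String))) : Decidable (Pre_deduplicate_playlist_items config playlist_items) := by unfold Pre_deduplicate_playlist_items; infer_instance

def pvWitness_deduplicate_playlist_items : (List (String × String)) × (List (List (String × String))) :=
  ([], [[("name", "a")], [("name", "b")], [("name", "a")]])

def Spec_deduplicate_playlist_items (config : List (String × String)) (playlist_items : List (List (String × String))) (out : List (List (String × String))) : Prop := out = deduplicate_playlist_items_alt config playlist_items
instance (config : List (String × String)) (playlist_items : List (List (String × String))) (out : List (List (String × String))) : Decidable (Spec_deduplicate_playlist_items config playlist_items out) := by unfold Spec_deduplicate_playlist_items; infer_instance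

-- ===== CLAIM (what is proved, stated in full; the proofs are below) =====
def Claim_equal_deduplicate_playlist_items : Prop := ∀ (config : List (String × String)) (playlist_items : List (List (String × String))), Dom_deduplicate_playlist_items config playlist_items → Pre_deduplicate_playlist_items config playlist_items → Spec_deduplicate_playlist_items config playlist_items (deduplicate_playlist_items config playlist_items)

-- ===== LEMMAS AND PROOFS =====

-- the common sequential specification both loops compute: the occurrence of name n preceded by
-- the names `pre` is relabeled with index pre.count n + 1 whenever n occurs > 1 times in `names`
def pvSpecList (names : List String) (pre : List String) (l : List (List (String × String))) : List (List (String × String)) :=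
  match l with
  | [] => []
  | it :: t =>
    (if 1 < names.count (pvName it) then
        pvSetName it (pvRename (pvName it) ((pre.count (pvName it) : Int) + 1))
      else it) :: pvSpecList names (pre ++ [pvName it]) t

-- positions (0-based, as Python ints) of the items named n, in playlist order
def pvIdxs (s : Int) (l : List (List (String × String))) (n : String) : List Int :=
  ((PySem.List.enumerate l s).filter (fun p => pvName p.2 == n)).map (·.1)

-- what both programs leave at position j
def pvTgt (l : List (List (String × String))) (j : Nat) : List (String × String) :=
  if 1 < (l.map pvName).count (pvName (l.getD j [])) then
    pvSetName (l.getD j [])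
      (pvRename (pvName (l.getD j [])) ((((l.map pvName).take (j+1)).count (pvName (l.getD j [])) : Int)))
  else l.getD j []

theorem pvSpecList_length (names pre : List String) (l : List (List (String × String))) :
    (pvSpecList names pre l).length = l.length := by
  induction l generalizing pre with
  | nil => rfl
  | cons it t ih => simp [pvSpecList, ih]

theorem pvSpecList_id (names pre : List String) (l : List (List (String × String)))
    (h : ∀ n ∈ l.map pvName, names.count n ≤ 1) : pvSpecList names pre l = l := by
  induction l generalizing pre with
  | nil => rfl
  | cons it t ih =>
    have h1 : names.count (pvName it) ≤ 1 := h _ (by simp)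
    simp only [pvSpecList]
    rw [if_neg (by omega), ih _ (fun n hn => h n (by simp [hn]))]

theorem pvSpecList_getElem? (names pre : List String) (l : List (List (String × String))) (j : Nat) (hj : j < l.length) :
    (pvSpecList names pre l)[j]? =
      some (if 1 < names.count (pvName l[j]) then
          pvSetName l[j] (pvRename (pvName l[j]) ((pre.count (pvName l[j]) : Int) + (((l.map pvName).take (j+1)).count (pvName l[j]) : Int)))
        else l[j]) := by
  induction l generalizing pre j with
  | nil => simp at hj
  | cons it t ih =>
    cases j with
    | zero =>
      simp only [pvSpecList, List.getElem?_cons_zero, List.getElem_cons_zero, List.map_cons,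
        List.take_succ_cons, List.take_zero, List.count_cons, List.count_nil]
      congr 1
      split
      · congr 2; simp
      · rfl
    | succ j =>
      have hj' : j < t.length := by simpa using hj
      simp only [pvSpecList, List.getElem?_cons_succ, List.getElem_cons_succ]
      rw [ih (pre ++ [pvName it]) j hj']
      congr 1
      split
      · congr 2
        rw [List.count_append]
        simp only [List.map_cons, List.take_succ_cons, List.count_cons]
        push_cast
        split <;> rename_i hsp <;> simp [hsp] <;> omega
      · rfl

-- membership in the set built by A's second loop
theorem pvMemIdxFold (L : List (String × Int)) (s : PySem.Set String) (n : String) :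
    n ∈ L.foldl (fun s p => if p.2 > 1 then PySem.Set.add s p.1 else s) s ↔
      n ∈ s ∨ ∃ p ∈ L, p.1 = n ∧ 1 < p.2 := by
  induction L generalizing s with
  | nil => simp
  | cons q t ih =>
    simp only [List.foldl_cons]
    by_cases hq : q.2 > 1
    · rw [if_pos hq, ih]
      simp only [PySem.Set.mem_add, List.mem_cons]
      constructor
      · intro h
        rcases h with h | h
        · rcases h with h | h
          · exact Or.inl h
          · exact Or.inr ⟨q, Or.inl rfl, h.symm, hq⟩
        · obtain ⟨p, hp, h1, h2⟩ := h
          exact Or.inr ⟨p, Or.inr hp, h1, h2⟩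
      · intro h
        rcases h with h | h
        · exact Or.inl (Or.inl h)
        · obtain ⟨p, hp, h1, h2⟩ := h
          rcases hp with rfl | hp
          · exact Or.inl (Or.inr h1.symm)
          · exact Or.inr ⟨p, hp, h1, h2⟩
    · rw [if_neg hq, ih]
      constructor
      · intro h
        rcases h with h | h
        · exact Or.inl h
        · obtain ⟨p, hp, h1, h2⟩ := h
          exact Or.inr ⟨p, List.mem_cons_of_mem _ hp, h1, h2⟩
      · intro h
        rcases h with h | h
        · exact Or.inl h
        · obtain ⟨p, hp, h1, h2⟩ := h
          rcases List.mem_cons.1 hp with rfl | hp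
          · omega
          · exact Or.inr ⟨p, hp, h1, h2⟩

-- A's second loop, with the counter abstracted by the names already processed (`pre`)
theorem pvAFold (names : List String) (idx : PySem.Set String)
    (hidx : ∀ m, PySem.Set.contains idx m = true ↔ 1 < names.count m)
    (l : List (List (String × String))) (pre : List String) (c : PySem.Dict String Int)
    (hc : ∀ m, 1 < names.count m → c.getD m 0 = (pre.count m : Int))
    (acc : List (List (String × String))) :
    (l.foldl
      (fun (st : PySem.Dict String Int × List (List (String × String))) item =>
        if PySem.Set.contains idx (pvName item) then
          (st.1.modify (pvName item) 0 (· + 1),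
           st.2 ++ [pvSetName item (pvRename (pvName item) ((st.1.modify (pvName item) 0 (· + 1)).getD (pvName item) 0))])
        else (st.1, st.2 ++ [item]))
      (c, acc)).2 = acc ++ pvSpecList names pre l := by
  induction l generalizing pre c acc with
  | nil => simp [pvSpecList]
  | cons it t ih =>
    simp only [List.foldl_cons]
    by_cases hn : PySem.Set.contains idx (pvName it) = true
    · rw [if_pos hn]
      have hcnt : 1 < names.count (pvName it) := (hidx _).1 hn
      have hval : (c.modify (pvName it) 0 (· + 1)).getD (pvName it) 0 = (pre.count (pvName it) : Int) + 1 := by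
        rw [PySem.Dict.getD_modify_self, hc _ hcnt]
      have hc' : ∀ m, 1 < names.count m → (c.modify (pvName it) 0 (· + 1)).getD m 0 = (((pre ++ [pvName it]).count m : Nat) : Int) := by
        intro m hm
        rw [PySem.Dict.getD_modify]
        rw [List.count_append]
        split <;> rename_i hmn
        · subst hmn; rw [hc _ hm]; simp
        · rw [hc _ hm]; simp [List.count_singleton, hmn]; exact fun h => hmn h.symm
      rw [ih (pre ++ [pvName it]) _ hc']
      simp only [pvSpecList, if_pos hcnt, hval]
      simp
    · rw [if_neg hn]
      have hcnt : ¬ 1 < names.count (pvName it) := fun h => hn ((hidx _).2 h)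
      have hc' : ∀ m, 1 < names.count m → c.getD m 0 = (((pre ++ [pvName it]).count m : Nat) : Int) := by
        intro m hm
        have hmn : m ≠ pvName it := fun h => hcnt (h ▸ hm)
        rw [List.count_append, hc _ hm]
        simp [List.count_singleton, hmn]
        exact fun h => hmn h.symm
      rw [ih (pre ++ [pvName it]) _ hc']
      simp only [pvSpecList, if_neg hcnt]
      simp

theorem pvIdxs_cons (s : Int) (it : List (String × String)) (t : List (List (String × String))) (n : String) :
    pvIdxs s (it :: t) n = (if pvName it == n then [s] else []) ++ pvIdxs (s + 1) t n := by
  simp only [pvIdxs, PySem.List.enumerate_cons, List.filter_cons]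
  split <;> simp

theorem pvIdxs_length (s : Int) (l : List (List (String × String))) (n : String) :
    (pvIdxs s l n).length = (l.map pvName).count n := by
  induction l generalizing s with
  | nil => simp [pvIdxs]
  | cons it t ih =>
    rw [pvIdxs_cons]
    simp only [List.length_append, ih, List.map_cons, List.count_cons]
    split <;> rename_i h <;> simp_all <;> omega

theorem pvIdxs_bounds (s : Int) (l : List (List (String × String))) (n : String) :
    ∀ x ∈ pvIdxs s l n, s ≤ x ∧ x < s + l.length := by
  induction l generalizing s with
  | nil => simp [pvIdxs]
  | cons it t ih =>
    rw [pvIdxs_cons]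
    intro x hx
    rcases List.mem_append.1 hx with h | h
    · have : x = s := by by_cases hc : pvName it == n <;> simp_all
      simp [this]
    · have := ih (s+1) x h
      constructor <;> [omega; (simp only [List.length_cons]; push_cast; omega)]

theorem pvIdxs_nodup (s : Int) (l : List (List (String × String))) (n : String) :
    (pvIdxs s l n).Nodup := by
  induction l generalizing s with
  | nil => simp [pvIdxs]
  | cons it t ih =>
    rw [pvIdxs_cons]
    apply List.Nodup.append _ (ih (s+1)) _
    · split <;> simp
    · rw [List.disjoint_left]
      intro x hx hy
      have hy' := pvIdxs_bounds (s+1) t n x hy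
      have : x = s := by by_cases hc : pvName it == n <;> simp_all
      omega

theorem pvIdxs_mem (s : Int) (l : List (List (String × String))) (n : String) (j : Nat) (hj : j < l.length) :
    (s + (j : Int) ∈ pvIdxs s l n) ↔ pvName l[j] = n := by
  induction l generalizing s j with
  | nil => simp at hj
  | cons it t ih =>
    rw [pvIdxs_cons]
    cases j with
    | zero =>
      simp only [List.mem_append, List.getElem_cons_zero, Int.natCast_zero, add_zero]
      constructor
      · rintro (h | h)
        · by_cases hc : pvName it == n <;> simp_all
        · exact absurd (pvIdxs_bounds _ _ _ _ h).1 (by omega)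
      · intro h; left; simp [h]
    | succ j =>
      have hj' : j < t.length := by simpa using hj
      have key := ih (s+1) j hj'
      simp only [List.mem_append, List.getElem_cons_succ]
      rw [show s + ((j:Nat)+1 : Nat) = (s + 1) + (j : Int) by push_cast; omega]
      rw [key]
      constructor
      · rintro (h | h)
        · have : s + 1 + (j:Int) = s := by by_cases hc : pvName it == n <;> simp_all
          omega
        · exact h
      · exact Or.inr

theorem pvIdxs_idxOf (s : Int) (l : List (List (String × String))) (n : String) (j : Nat) (hj : j < l.length)
    (hn : pvName l[j] = n) :
    (pvIdxs s l n).idxOf (s + (j : Int)) = ((l.map pvName).take j).count n := by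
  induction l generalizing s j with
  | nil => simp at hj
  | cons it t ih =>
    rw [pvIdxs_cons]
    cases j with
    | zero =>
      have h0 : pvName it = n := by simpa using hn
      simp [h0]
    | succ j =>
      have hj' : j < t.length := by simpa using hj
      have hn' : pvName t[j] = n := by simpa using hn
      have key := ih (s+1) j hj' hn'
      by_cases hc : pvName it == n
      · rw [if_pos hc]
        simp only [List.cons_append, List.nil_append]
        have hne : (s == s + ((j:Nat)+1 : Nat)) = false := by
          simp; push_cast; omega
        rw [List.idxOf_cons, hne]
        simp only [cond_false]
        rw [show (s + ((j:Nat)+1 : Nat) : Int) = (s + 1) + (j : Int) by push_cast; omega, key]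
        simp only [List.map_cons, List.take_succ_cons, List.count_cons]
        have : (pvName it == n) = true := hc
        simp [this]
      · rw [if_neg hc]
        simp only [List.nil_append]
        rw [show (s + ((j:Nat)+1 : Nat) : Int) = (s + 1) + (j : Int) by push_cast; omega, key]
        simp only [List.map_cons, List.take_succ_cons, List.count_cons]
        have : (pvName it == n) = false := by simpa using hc
        simp [this]

theorem pvPyGetD (lst : List (List (String × String))) (i : Nat) (h : i < lst.length) :
    PySem.List.pyGetD lst (i : Int) [] = lst[i] := by
  rw [PySem.List.pyGetD_natCast]
  simp [List.getD_eq_getElem?_getD, List.getElem?_eq_getElem h]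

-- B's bucket loop: relabels exactly the positions listed in idxs, in enumeration order
theorem pvInnerFold (nm : String) (idxs : List Int) (k0 : Int) (lst : List (List (String × String)))
    (hb : ∀ x ∈ idxs, 0 ≤ x ∧ x < (lst.length : Int)) (hnd : idxs.Nodup) :
    ((PySem.List.enumerate idxs k0).foldl
        (fun lst r => PySem.List.pySetD lst r.2 (pvSetName (PySem.List.pyGetD lst r.2 []) (pvRename nm r.1)))
        lst).length = lst.length ∧
    ∀ j : Nat, j < lst.length →
      ((PySem.List.enumerate idxs k0).foldl
        (fun lst r => PySem.List.pySetD lst r.2 (pvSetName (PySem.List.pyGetD lst r.2 []) (pvRename nm r.1)))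
        lst)[j]? = if (j:Int) ∈ idxs then some (pvSetName (lst.getD j []) (pvRename nm (k0 + (idxs.idxOf (j:Int) : Int)))) else lst[j]? := by
  induction idxs generalizing k0 lst with
  | nil => simp [PySem.List.enumerate_nil]
  | cons i t ih =>
    obtain ⟨hi0, hilen⟩ := hb i (by simp)
    have hmem : i ∉ t := by simp_all
    obtain ⟨m, rfl⟩ : ∃ m : Nat, i = (m : Int) := ⟨i.toNat, by omega⟩
    have hmlen : m < lst.length := by exact_mod_cast hilen
    rw [PySem.List.enumerate_cons]
    simp only [List.foldl_cons, PySem.List.pySetD_natCast, pvPyGetD lst m hmlen]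
    set v := pvSetName lst[m] (pvRename nm k0) with hv
    set lst1 := lst.set m v with hlst1
    have hlen1 : lst1.length = lst.length := by simp [hlst1]
    have hb1 : ∀ x ∈ t, 0 ≤ x ∧ x < (lst1.length : Int) := by
      intro x hx; have := hb x (by simp [hx]); omega
    obtain ⟨ihlen, ihget⟩ := ih (k0 + 1) lst1 hb1 (by simp_all)
    refine ⟨by rw [ihlen, hlen1], ?_⟩
    intro j hj
    rw [ihget j (by omega)]
    by_cases hjt : (j:Int) ∈ t
    · rw [if_pos hjt, if_pos (by simp [hjt])]
      have hne : m ≠ j := by rintro rfl; exact hmem hjt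
      have h1 : lst1.getD j [] = lst.getD j [] := by
        simp [hlst1, List.getD_eq_getElem?_getD, List.getElem?_set, hne]
      rw [h1]
      have hio : ((m:Int) :: t).idxOf (j:Int) = t.idxOf (j:Int) + 1 := by
        simp [List.idxOf_cons, show (((m:Int) == (j:Int)) = false) by simp; omega]
      rw [hio, show k0 + ((t.idxOf (j:Int) + 1 : Nat) : Int) = k0 + 1 + ((t.idxOf (j:Int) : Nat) : Int) by push_cast; omega]
    · rw [if_neg hjt]
      by_cases hji : j = m
      · subst hji
        rw [if_pos (by simp)]
        have : lst1[j]? = some v := by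
          simp [hlst1, List.getElem?_set, hj]
        rw [this]
        have : (((j:Int)) :: t).idxOf (j:Int) = 0 := by simp [List.idxOf_cons]
        rw [this]
        simp [hv, List.getD_eq_getElem?_getD, List.getElem?_eq_getElem hj]
      · rw [if_neg (by simp; exact ⟨by omega, hjt⟩)]
        simp [hlst1, List.getElem?_set, show m ≠ j from fun h => hji h.symm]

-- B's outer loop over the grouping dict's buckets, by induction on the remaining names
theorem pvBFold (l : List (List (String × String))) (ns : List String) (done : List String)
    (hnd : ns.Nodup) (hdisj : ∀ m ∈ ns, m ∉ done)
    (lst : List (List (String × String))) (hlen : lst.length = l.length)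
    (hinv : ∀ j : Nat, j < l.length →
      lst[j]? = some (if pvName (l.getD j []) ∈ done ∧ 1 < (l.map pvName).count (pvName (l.getD j [])) then pvTgt l j else l.getD j [])) :
    ((ns.map (fun n => (n, pvIdxs 0 l n))).foldl
        (fun lst q =>
          if q.2.length > 1 then
            (PySem.List.enumerate q.2 1).foldl
              (fun lst r => PySem.List.pySetD lst r.2 (pvSetName (PySem.List.pyGetD lst r.2 []) (pvRename q.1 r.1)))
              lst
          else lst)
        lst).length = l.length ∧
    ∀ j : Nat, j < l.length →
      ((ns.map (fun n => (n, pvIdxs 0 l n))).foldl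
        (fun lst q =>
          if q.2.length > 1 then
            (PySem.List.enumerate q.2 1).foldl
              (fun lst r => PySem.List.pySetD lst r.2 (pvSetName (PySem.List.pyGetD lst r.2 []) (pvRename q.1 r.1)))
              lst
          else lst)
        lst)[j]? = some (if pvName (l.getD j []) ∈ done ++ ns ∧ 1 < (l.map pvName).count (pvName (l.getD j [])) then pvTgt l j else l.getD j []) := by
  induction ns generalizing done lst with
  | nil =>
    refine ⟨by simpa using hlen, ?_⟩
    intro j hj
    simpa using hinv j hj
  | cons n ns ih =>
    simp only [List.map_cons, List.foldl_cons]
    have hbnd : ∀ x ∈ pvIdxs 0 l n, 0 ≤ x ∧ x < (lst.length : Int) := by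
      intro x hx
      have := pvIdxs_bounds 0 l n x hx
      omega
    by_cases hgt : (pvIdxs 0 l n).length > 1
    · rw [if_pos hgt]
      have hcnt : 1 < (l.map pvName).count n := by rw [← pvIdxs_length 0]; exact hgt
      obtain ⟨ilen, iget⟩ := pvInnerFold n (pvIdxs 0 l n) 1 lst hbnd (pvIdxs_nodup 0 l n)
      set lst1 := (PySem.List.enumerate (pvIdxs 0 l n) 1).foldl
              (fun lst r => PySem.List.pySetD lst r.2 (pvSetName (PySem.List.pyGetD lst r.2 []) (pvRename n r.1)))
              lst with hlst1
      have hlen1 : lst1.length = l.length := by rw [ilen, hlen]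
      have hinv1 : ∀ j : Nat, j < l.length →
          lst1[j]? = some (if pvName (l.getD j []) ∈ (done ++ [n]) ∧ 1 < (l.map pvName).count (pvName (l.getD j [])) then pvTgt l j else l.getD j []) := by
        intro j hj
        have hjlst : j < lst.length := by omega
        have hgetd : l.getD j [] = l[j] := by
          simp [List.getD_eq_getElem?_getD, List.getElem?_eq_getElem hj]
        rw [iget j hjlst]
        by_cases hjn : pvName l[j] = n
        · have hmem : ((j:Nat) : Int) ∈ pvIdxs 0 l n := by
            have := (pvIdxs_mem 0 l n j hj).2 hjn
            simpa using this
          rw [if_pos hmem]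
          have hlstj : lst.getD j [] = l.getD j [] := by
            have := hinv j hj
            have hdone : pvName (l.getD j []) ∉ done := by
              rw [hgetd, hjn]; exact hdisj n (by simp)
            rw [if_neg (by tauto)] at this
            simp [List.getD_eq_getElem?_getD, this]
          have hidxof : (pvIdxs 0 l n).idxOf ((j:Nat) : Int) = ((l.map pvName).take j).count n := by
            have := pvIdxs_idxOf 0 l n j hj hjn
            simpa using this
          rw [hlstj, hidxof]
          have hcount : (((l.map pvName).take (j+1)).count n : Int) = 1 + (((l.map pvName).take j).count n : Int) := by
            rw [List.take_succ]
            have : (l.map pvName)[j]? = some n := by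
              rw [List.getElem?_map, List.getElem?_eq_getElem hj]
              simp [hjn]
            rw [this]
            simp [List.count_append, hjn]
            try omega
          rw [if_pos (by rw [hgetd, hjn]; exact ⟨by simp, hcnt⟩)]
          rw [pvTgt, if_pos (by rw [hgetd, hjn]; exact hcnt)]
          rw [hgetd, hjn, hcount]
        · have hnmem : ((j:Nat) : Int) ∉ pvIdxs 0 l n := by
            intro hmem
            exact hjn ((pvIdxs_mem 0 l n j hj).1 (by simpa using hmem))
          rw [if_neg hnmem, hinv j hj]
          rw [hgetd]
          have hxx : (pvName l[j] ∈ done ++ [n]) ↔ (pvName l[j] ∈ done) := by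
            simp only [List.mem_append, List.mem_singleton]
            exact or_iff_left hjn
          simp only [hxx]
      have := ih (done ++ [n]) (by simp_all) (by
          intro m hm
          simp only [List.mem_append, List.mem_singleton]
          rintro (h | rfl)
          · exact hdisj m (by simp [hm]) h
          · exact (by simp_all : m ∉ ns) hm) lst1 hlen1 hinv1
      obtain ⟨flen, fget⟩ := this
      refine ⟨flen, ?_⟩
      intro j hj
      rw [fget j hj]
      congr 1
      simp [List.append_assoc]
    · rw [if_neg hgt]
      have hcnt : ¬ 1 < (l.map pvName).count n := by rw [← pvIdxs_length 0]; exact hgt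
      have hinv1 : ∀ j : Nat, j < l.length →
          lst[j]? = some (if pvName (l.getD j []) ∈ (done ++ [n]) ∧ 1 < (l.map pvName).count (pvName (l.getD j [])) then pvTgt l j else l.getD j []) := by
        intro j hj
        rw [hinv j hj]
        by_cases hjn : pvName (l.getD j []) = n
        · rw [hjn]
          simp [hcnt]
        · have hxx : (pvName (l.getD j []) ∈ done ++ [n]) ↔ (pvName (l.getD j []) ∈ done) := by
            simp only [List.mem_append, List.mem_singleton]
            exact or_iff_left hjn
          simp only [hxx]
      have := ih (done ++ [n]) (by simp_all) (by
          intro m hm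
          simp only [List.mem_append, List.mem_singleton]
          rintro (h | rfl)
          · exact hdisj m (by simp [hm]) h
          · exact (by simp_all : m ∉ ns) hm) lst hlen hinv1
      obtain ⟨flen, fget⟩ := this
      refine ⟨flen, ?_⟩
      intro j hj
      rw [fget j hj]
      congr 1
      simp [List.append_assoc]

theorem pvA_eq (config : List (String × String)) (pl : List (List (String × String))) :
    deduplicate_playlist_items config pl = pvSpecList (pl.map pvName) [] pl := by
  simp only [deduplicate_playlist_items]
  have hcounter : pl.foldl (fun d item => d.modify (pvName item) 0 (· + 1)) PySem.Dict.empty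
      = PySem.Dict.counter (pl.map pvName) := by
    rw [PySem.Dict.counter_eq_foldl, List.foldl_map]
  rw [hcounter]
  set names := pl.map pvName with hnames
  set idx := (PySem.Dict.counter names).items.foldl
      (fun s p => if p.2 > 1 then PySem.Set.add s p.1 else s) PySem.Set.empty with hidxdef
  have hidx : ∀ m, PySem.Set.contains idx m = true ↔ 1 < names.count m := by
    intro m
    have hmem : m ∈ idx ↔ 1 < names.count m := by
      rw [hidxdef, pvMemIdxFold, PySem.Dict.items_counter]
      constructor
      · rintro (h | h)
        · simp [PySem.Set.empty] at h
        · obtain ⟨p, hp, h1, h2⟩ := h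
          obtain ⟨k, hk, rfl⟩ := List.mem_map.1 hp
          subst h1
          simp at h2 ⊢
          exact_mod_cast h2
      · intro h
        refine Or.inr ⟨(m, (names.count m : Int)), ?_, rfl, by simp; exact_mod_cast h⟩
        exact List.mem_map.2 ⟨m, (PySem.Set.mem_ofList _ _).2 (List.count_pos_iff.1 (by omega)), rfl⟩
    rw [← hmem]
    simp [PySem.Set.contains]
  by_cases hz : idx.length = 0
  · rw [if_pos hz]
    refine (pvSpecList_id _ _ _ ?_).symm
    intro n hn
    by_contra hgt
    push_neg at hgt
    have : n ∈ idx := by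
      have := (hidx n).2 hgt
      simpa [PySem.Set.contains] using this
    rw [List.length_eq_zero_iff.1 hz] at this
    simp at this
  · rw [if_neg hz]
    have := pvAFold names idx hidx pl [] PySem.Dict.empty
      (fun m _ => by simp [PySem.Dict.getD_empty]) []
    simpa using this

theorem pvB_eq (config : List (String × String)) (pl : List (List (String × String))) :
    deduplicate_playlist_items_alt config pl = pvSpecList (pl.map pvName) [] pl := by
  simp only [deduplicate_playlist_items_alt]
  set names := pl.map pvName with hnames
  set G := (PySem.List.enumerate pl).foldl (fun d p => d.modify (pvName p.2) [] (· ++ [p.1])) PySem.Dict.empty with hG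
  have hmapnames : (PySem.List.enumerate pl).map (fun p => pvName p.2) = names := by
    rw [hnames, show (fun p : Int × List (String × String) => pvName p.2) = pvName ∘ Prod.snd from rfl, ← List.map_map]
    congr 1
    exact PySem.List.map_snd_enumerate pl 0
  have hkeys : G.keys = PySem.Set.ofList names := by
    rw [hG, PySem.Dict.keys_foldl_modify_key, hmapnames]
    rfl
  have hgetD : ∀ n, G.getD n [] = pvIdxs 0 pl n := by
    intro n
    have h1 : G = ((PySem.List.enumerate pl).map (fun p => (pvName p.2, p.1))).foldl (fun d q => d.modify q.1 [] (· ++ [q.2])) PySem.Dict.empty := by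
      rw [hG, List.foldl_map]
    rw [h1, PySem.Dict.getD_foldl_modify_append]
    simp [pvIdxs, PySem.Dict.getD_empty, List.filter_map, Function.comp_def]
  have hitems : G.items = (PySem.Set.ofList names).map (fun n => (n, pvIdxs 0 pl n)) := by
    rw [PySem.Dict.items_eq_map_keys G (hkeys ▸ PySem.Set.nodup_ofList names) []]
    rw [hkeys]
    exact List.map_congr_left (fun k _ => by rw [hgetD])
  rw [hitems]
  obtain ⟨flen, fget⟩ := pvBFold pl (PySem.Set.ofList names) [] (PySem.Set.nodup_ofList names) (by simp) pl rfl
    (fun j hj => by simp [List.getD_eq_getElem?_getD, List.getElem?_eq_getElem hj])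
  apply List.ext_getElem?
  intro j
  by_cases hj : j < pl.length
  · rw [fget j hj, pvSpecList_getElem? names [] pl j hj]
    have hgetd : pl.getD j [] = pl[j] := by simp [List.getD_eq_getElem?_getD, List.getElem?_eq_getElem hj]
    have hmem : pvName pl[j] ∈ ([] : List String) ++ PySem.Set.ofList names := by
      simp only [List.nil_append]
      exact (PySem.Set.mem_ofList _ _).2 (by rw [hnames]; exact List.mem_map_of_mem (pl.getElem_mem hj))
    rw [pvTgt, hgetd]
    by_cases hc : 1 < names.count (pvName pl[j])
    · rw [if_pos ⟨hmem, hc⟩, if_pos hc, if_pos hc]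
      simp
    · rw [if_neg (by tauto), if_neg hc]
  · have hj' : pl.length ≤ j := by omega
    rw [List.getElem?_eq_none (by rw [flen]; exact hj'),
      List.getElem?_eq_none (by rw [pvSpecList_length]; exact hj')]

-- ===== VERDICT (by name: the statement is the Claim_ definition above) =====
theorem deduplicate_playlist_items_spec : Claim_equal_deduplicate_playlist_items := by
  intro config playlist_items _ _
  unfold Spec_deduplicate_playlist_items
  rw [pvA_eq, pvB_eq]
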